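-- pv_equiv track=rewrite | github.com/BenGale93/word_games | word_games/games/anagram.py | _reusable_letters
-- ===== SOURCE A (Python) =====
-- from collections import Counter
--
-- def _reusable_letters(input_str: str, target_length: int, reusable: str) -> str:
--     """Extends the input string with the a set of reusable letters. Each
--     letter is added to the string so that the total number of that letter
--     is equal to target_length.
--
--     Args:
--         input_str: A string, which could be a word or jumbled set of letters,
--         target_length: Number of times the reusable letters will appear in
--             the output string.
--         reusable: A string containing the letters to repeat
--
--     Raises:
--         ValueError: If the letters specified in "reusable" cannot be found in
--             "input_str".
--
--     Returns:
--         Modified string.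
--     """
--     reusable = set(reusable)
--     unique_letters = set(input_str)
--     all_letters = list(input_str)
--     letter_counter = Counter(input_str)
--
--     excess_letters = reusable - unique_letters
--     if excess_letters:
--         raise ValueError(
--             "The letters specified as reusable do not all appear in the input string."
--         )
--
--     for letter in reusable:
--         count = letter_counter[letter]
--         for i in range(count, target_length):
--             all_letters.append(letter)
--
--     return "".join(sorted(all_letters))
-- ===== SOURCE B (Python) =====
-- def _reusable_letters(input_str: str, target_length: int, reusable: str) -> str:
--     """Sort-then-scan: run-length scan over the sorted characters, bumping each
--     reusable letter's run up to target_length copies; validation by consuming a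
--     pending set of reusable letters during the scan."""
--     pending = set(reusable)
--     s = sorted(input_str)
--     parts = []
--     i = 0
--     n = len(s)
--     while i < n:
--         ch = s[i]
--         j = i + 1
--         while j < n and s[j] == ch:
--             j += 1
--         count = j - i
--         if ch in pending:
--             pending.discard(ch)
--             count = max(count, target_length)
--         parts.append(ch * count)
--         i = j
--     if pending:
--         raise ValueError(
--             "The letters specified as reusable do not all appear in the input string."
--         )
--     return "".join(parts)
-- ===== Notes on version B (the rewrite author's own statement) =====
-- stated objective: alternative
-- what changed: B sorts the input characters first and then emits the result in one run-length scan over the sorted data (bumping a reusable letter's run to target_length when the run is reached, validating by consuming a pending set), instead of A's Counter-based expansion of a flat character list followed by a full sort.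
import Mathlib
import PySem

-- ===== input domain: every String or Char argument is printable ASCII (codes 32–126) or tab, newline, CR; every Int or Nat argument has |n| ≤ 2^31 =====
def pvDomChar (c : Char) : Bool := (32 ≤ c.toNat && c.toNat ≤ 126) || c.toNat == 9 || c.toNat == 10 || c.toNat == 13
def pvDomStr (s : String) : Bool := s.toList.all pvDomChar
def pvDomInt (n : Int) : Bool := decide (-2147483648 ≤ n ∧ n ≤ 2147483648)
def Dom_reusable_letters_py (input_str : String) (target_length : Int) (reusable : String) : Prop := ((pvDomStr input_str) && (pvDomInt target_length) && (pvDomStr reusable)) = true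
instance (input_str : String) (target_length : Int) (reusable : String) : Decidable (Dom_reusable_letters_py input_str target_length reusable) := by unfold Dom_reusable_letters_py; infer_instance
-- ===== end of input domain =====

-- B sorts the input characters first and emits the result in one run-length scan over the
-- sorted data (bumping a reusable run to target_length, validating via a pending set),
-- instead of A's Counter-based expansion of a flat list followed by a full sort; objective: alternative.

-- ===== PORT A =====
-- The loop iterates over a Python set, but the appended multiset of letters does not depend
-- on that iteration order (the counter is never mutated) and the result is sorted afterwards.
-- The ValueError branch ('reusable - set(input_str)' nonempty) is excluded by Pre_.
def reusable_letters_py (input_str : String) (target_length : Int) (reusable : String) : String :=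
  let reusableSet : PySem.Set Char := PySem.Set.ofList reusable.toList
  let letterCounter : PySem.Dict Char Int := PySem.Dict.counter input_str.toList
  let allLetters : List Char :=
    reusableSet.foldl (fun acc letter =>
      (PySem.List.pyRange (letterCounter.getD letter 0) target_length 1).foldl
        (fun acc2 _ => acc2 ++ [letter]) acc) input_str.toList
  String.mk (PySem.List.sorted allLetters (fun x => x) false)

-- ===== PORT B =====
-- B's while loop over indices i < j of the sorted list, transcribed as structural recursion:
-- the head run s[i..j) is takeWhile (= ch), the continuation at i = j is dropWhile.
-- 'parts.append(ch * count)' is the append of pyRepeat [ch] count; join = the accumulator.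
def pvRunScan (tl : Int) (s : List Char) (pending : PySem.Set Char) (acc : List Char) : List Char :=
  match s with
  | [] => acc
  | ch :: rest =>
    let run := rest.takeWhile (fun c => c == ch)
    let count : Int := (run.length : Int) + 1
    if PySem.Set.contains pending ch then
      pvRunScan tl (rest.dropWhile (fun c => c == ch)) (PySem.Set.discard pending ch)
        (acc ++ PySem.List.pyRepeat [ch] (max count tl))
    else
      pvRunScan tl (rest.dropWhile (fun c => c == ch)) pending
        (acc ++ PySem.List.pyRepeat [ch] count)
termination_by s.length
decreasing_by
  all_goals
    simp only [List.length_cons]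
    have := List.length_dropWhile_le (fun c => c == ch) rest
    omega

-- The final 'if pending: raise ValueError' branch is excluded by Pre_ (under Pre_ the pending
-- set is fully consumed by the scan).
def reusable_letters_py_alt (input_str : String) (target_length : Int) (reusable : String) : String :=
  let pending : PySem.Set Char := PySem.Set.ofList reusable.toList
  let s : List Char := PySem.List.sorted input_str.toList (fun x => x) false
  String.mk (pvRunScan target_length s pending [])

-- ===== PRECONDITION & SPEC =====
-- Pre_ excludes exactly the inputs where A (and B) raise ValueError: a reusable letter absent from input_str.
def Pre_reusable_letters_py (input_str : String) (target_length : Int) (reusable : String) : Prop :=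
  (reusable.toList.all (fun c => input_str.toList.contains c)) = true
instance (input_str : String) (target_length : Int) (reusable : String) : Decidable (Pre_reusable_letters_py input_str target_length reusable) := by unfold Pre_reusable_letters_py; infer_instance

def pvWitness_reusable_letters_py : String × Int × String := ("ab", 2, "a")

def Spec_reusable_letters_py (input_str : String) (target_length : Int) (reusable : String) (out : String) : Prop := out = reusable_letters_py_alt input_str target_length reusable
instance (input_str : String) (target_length : Int) (reusable : String) (out : String) : Decidable (Spec_reusable_letters_py input_str target_length reusable out) := by unfold Spec_reusable_letters_py; infer_instance

-- ===== CLAIM (what is proved, stated in full; the proofs are below) =====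
def Claim_equal_reusable_letters_py : Prop := ∀ (input_str : String) (target_length : Int) (reusable : String), Dom_reusable_letters_py input_str target_length reusable → Pre_reusable_letters_py input_str target_length reusable → Spec_reusable_letters_py input_str target_length reusable (reusable_letters_py input_str target_length reusable)

-- ===== LEMMAS AND PROOFS =====

-- Counting letters in a blocks-of-replicates list over a nodup key list (A's extension).
theorem count_flatMap_replicate (K : List Char) (hK : K.Nodup) (n : Char → Nat) (c : Char) :
    (K.flatMap (fun ch => List.replicate (n ch) ch)).count c =
      if c ∈ K then n c else 0 := by
  induction K with
  | nil => simp
  | cons k K ih =>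
    simp only [List.nodup_cons] at hK
    simp only [List.flatMap_cons, List.count_append, ih hK.2, List.mem_cons]
    by_cases hc : c = k
    · subst hc
      simp [hK.1]
    · simp [hc, List.count_replicate, Ne.symm hc]

-- Characterisation of B's run-length scan on a ≤-sorted list: it appends to acc a ≤-sorted
-- block list whose letter counts are the run lengths, bumped to tl for pending letters.
theorem runScan_spec (tl : Int) : ∀ (n : Nat) (s : List Char), s.length ≤ n →
    ∀ (P : PySem.Set Char), s.Pairwise (· ≤ ·) → ∀ (acc : List Char),
    ∃ L : List Char, pvRunScan tl s P acc = acc ++ L ∧ L.Pairwise (· ≤ ·) ∧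
      (∀ c ∈ L, c ∈ s) ∧
      (∀ c, L.count c = if c ∈ s then
          (if c ∈ P then (max ((s.count c : Int)) tl).toNat else s.count c) else 0) := by
  intro n
  induction n with
  | zero =>
    intro s hs _ _ acc
    have : s = [] := List.eq_nil_of_length_eq_zero (Nat.le_zero.1 hs)
    subst this
    exact ⟨[], by simp [pvRunScan]⟩
  | succ n ih =>
    intro s hlen P hsorted acc
    match s with
    | [] => exact ⟨[], by simp [pvRunScan]⟩
    | ch :: rest =>
      simp only [List.pairwise_cons] at hsorted
      set run := rest.takeWhile (fun c => c == ch) with hrun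
      set tail := rest.dropWhile (fun c => c == ch) with htail
      have hsplit : run ++ tail = rest := List.takeWhile_append_dropWhile
      have hrunch : ∀ a ∈ run, a = ch := fun a ha => by
        simpa using List.mem_takeWhile_imp ha
      have htailmem : ∀ a ∈ tail, a ∈ rest := fun a ha =>
        (List.dropWhile_sublist _).mem ha
      have htailsorted : tail.Pairwise (· ≤ ·) :=
        hsorted.2.sublist (List.dropWhile_sublist _)
      have htaillt : ∀ a ∈ tail, ch < a := by
        intro a ha
        have hne : tail ≠ [] := List.ne_nil_of_mem ha
        have hh : ((tail.head hne) == ch) = false :=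
          List.head_dropWhile_not (fun c => c == ch) hne
        have hhne : tail.head hne ≠ ch := by simpa using hh
        have hchh : ch < tail.head hne :=
          lt_of_le_of_ne (hsorted.1 _ (htailmem _ (List.head_mem hne))) (Ne.symm hhne)
        rcases (by rw [← List.cons_head_tail hne] at ha; exact List.mem_cons.1 ha :
            a = tail.head hne ∨ a ∈ tail.tail) with rfl | hat
        · exact hchh
        · have hp := htailsorted
          rw [← List.cons_head_tail hne] at hp
          exact lt_of_lt_of_le hchh ((List.pairwise_cons.1 hp).1 a hat)
      have hchnot : ch ∉ tail := fun h => lt_irrefl ch (htaillt ch h)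
      -- counts in s
      have hcount_ch : (ch :: rest).count ch = run.length + 1 := by
        rw [← hsplit]
        have h1 : run.count ch = run.length :=
          List.count_eq_length.2 (fun a ha => by simpa using (hrunch a ha).symm)
        have h2 : tail.count ch = 0 := List.count_eq_zero.2 hchnot
        simp [List.count_cons, List.count_append, h1, h2, Nat.add_comm]
      have hcount_ne : ∀ c, c ≠ ch → (ch :: rest).count c = tail.count c := by
        intro c hc
        rw [← hsplit]
        have h1 : run.count c = 0 :=
          List.count_eq_zero.2 (fun h => hc (hrunch c h))
        simp [List.count_cons, List.count_append, h1, Ne.symm hc]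
      have htaillen : tail.length ≤ n := by
        have h1 : tail.length ≤ rest.length := by
          rw [htail]; exact List.length_dropWhile_le _ _
        simp only [List.length_cons] at hlen
        omega
      -- the block appended for this run
      unfold pvRunScan
      simp only [← hrun, ← htail]
      by_cases hmem : ch ∈ P
      · have hcont : PySem.Set.contains P ch = true := by
          simpa [PySem.Set.contains_eq_listContains] using hmem
        simp only [hcont, if_true]
        obtain ⟨L, hL, hLsort, hLmem, hLcount⟩ :=
          ih tail htaillen (PySem.Set.discard P ch) htailsorted
            (acc ++ PySem.List.pyRepeat [ch] (max ((run.length : Int) + 1) tl))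
        refine ⟨PySem.List.pyRepeat [ch] (max ((run.length : Int) + 1) tl) ++ L,
          by rw [hL, List.append_assoc], ?_, ?_, ?_⟩
        · rw [PySem.List.pyRepeat_singleton]
          refine List.pairwise_append.2 ⟨List.pairwise_replicate.2 (Or.inr le_rfl), hLsort, ?_⟩
          intro a ha b hb
          obtain rfl := List.eq_of_mem_replicate ha
          exact le_of_lt (htaillt b (hLmem b hb))
        · intro c hc
          rw [PySem.List.pyRepeat_singleton] at hc
          rcases List.mem_append.1 hc with h | h
          · obtain rfl := List.eq_of_mem_replicate h
            exact List.mem_cons_self ..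
          · exact List.mem_cons_of_mem _ (htailmem c (hLmem c h))
        · intro c
          rw [List.count_append, PySem.List.pyRepeat_singleton, List.count_replicate,
            hLcount c]
          by_cases hc : c = ch
          · subst hc
            have hnot : c ∉ tail := hchnot
            simp only [hnot, if_false, beq_self_eq_true, if_true, List.mem_cons, true_or,
              if_true, hmem, hcount_ch]
            push_cast
            ring_nf
          · have hPc : (c ∈ PySem.Set.discard P ch) ↔ c ∈ P := by
              rw [PySem.Set.mem_discard]
              exact ⟨fun h => h.1, fun h => ⟨h, hc⟩⟩
            have hcs : c ∈ ch :: rest ↔ c ∈ tail := by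
              constructor
              · intro h
                rcases List.mem_cons.1 h with rfl | h
                · exact absurd rfl hc
                · rw [← hsplit] at h
                  rcases List.mem_append.1 h with h | h
                  · exact absurd (hrunch c h) hc
                  · exact h
              · intro h
                exact List.mem_cons_of_mem _ (htailmem c h)
            have hbeq : (ch == c) = false := by simpa using (Ne.symm hc)
            simp only [hPc, hcs, hcount_ne c hc]
            simp [hbeq]
      · have hcont : PySem.Set.contains P ch = false := by
          simpa [PySem.Set.contains_eq_listContains] using hmem
        simp only [hcont, if_false, Bool.false_eq_true]
        obtain ⟨L, hL, hLsort, hLmem, hLcount⟩ :=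
          ih tail htaillen P htailsorted
            (acc ++ PySem.List.pyRepeat [ch] ((run.length : Int) + 1))
        refine ⟨PySem.List.pyRepeat [ch] ((run.length : Int) + 1) ++ L,
          by rw [hL, List.append_assoc], ?_, ?_, ?_⟩
        · rw [PySem.List.pyRepeat_singleton]
          refine List.pairwise_append.2 ⟨List.pairwise_replicate.2 (Or.inr le_rfl), hLsort, ?_⟩
          intro a ha b hb
          obtain rfl := List.eq_of_mem_replicate ha
          exact le_of_lt (htaillt b (hLmem b hb))
        · intro c hc
          rw [PySem.List.pyRepeat_singleton] at hc
          rcases List.mem_append.1 hc with h | h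
          · obtain rfl := List.eq_of_mem_replicate h
            exact List.mem_cons_self ..
          · exact List.mem_cons_of_mem _ (htailmem c (hLmem c h))
        · intro c
          rw [List.count_append, PySem.List.pyRepeat_singleton, List.count_replicate,
            hLcount c]
          by_cases hc : c = ch
          · subst hc
            have hnot : c ∉ tail := hchnot
            simp only [hnot, if_false, beq_self_eq_true, if_true, List.mem_cons, true_or,
              if_true, hmem, hcount_ch]
            omega
          · have hcs : c ∈ ch :: rest ↔ c ∈ tail := by
              constructor
              · intro h
                rcases List.mem_cons.1 h with rfl | h
                · exact absurd rfl hc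
                · rw [← hsplit] at h
                  rcases List.mem_append.1 h with h | h
                  · exact absurd (hrunch c h) hc
                  · exact h
              · intro h
                exact List.mem_cons_of_mem _ (htailmem c h)
            have hbeq : (ch == c) = false := by simpa using (Ne.symm hc)
            simp only [hcs, hcount_ne c hc]
            simp [hbeq]

-- ===== VERDICT (by name: the statement is the Claim_ definition above) =====
theorem reusable_letters_py_spec : Claim_equal_reusable_letters_py := by
  intro input_str tl reusable _ hpre
  unfold Pre_reusable_letters_py at hpre
  simp only [List.all_eq_true, List.contains_iff_mem] at hpre
  unfold Spec_reusable_letters_py reusable_letters_py reusable_letters_py_alt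
  set xs := input_str.toList with hxs
  set R : List Char := PySem.Set.ofList reusable.toList with hRdef
  have hRnodup : R.Nodup := PySem.Set.nodup_ofList _
  have hRsub : ∀ c ∈ R, c ∈ xs := fun c hc => hpre c ((PySem.Set.mem_ofList _ _).1 hc)
  -- A's expanded list, as blocks of replicates over R
  have hA : R.foldl (fun acc letter =>
      (PySem.List.pyRange ((PySem.Dict.counter xs).getD letter 0) tl 1).foldl
        (fun acc2 _ => acc2 ++ [letter]) acc) xs =
      xs ++ R.flatMap (fun letter => List.replicate (tl - (xs.count letter : Int)).toNat letter) := by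
    rw [← PySem.List.foldl_append_eq_flatMap]
    apply PySem.List.foldl_congr_mem
    intro acc letter _
    rw [PySem.List.foldl_append_singleton_eq_map, PySem.Dict.getD_counter]
    congr 1
    calc (PySem.List.pyRange ((xs.count letter : Int)) tl 1).map (fun _ => letter)
        = List.replicate (PySem.List.pyRange ((xs.count letter : Int)) tl 1).length letter := by
          rw [List.map_const']
      _ = List.replicate (tl - (xs.count letter : Int)).toNat letter := by
          rw [PySem.List.length_pyRange_one]
  simp only [hA]
  -- B's sorted input
  set S : List Char := PySem.List.sorted xs (fun x => x) false with hS
  have hSperm : S.Perm xs := PySem.List.sorted_perm _ _ _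
  have hSsorted : S.Pairwise (· ≤ ·) := PySem.List.sorted_pairwise _ _
  obtain ⟨L, hL, hLsort, _, hLcount⟩ :=
    runScan_spec tl S.length S le_rfl R hSsorted []
  rw [hL, List.nil_append]
  -- L is a sorted permutation of A's expanded list
  have hperm : L.Perm
      (xs ++ R.flatMap (fun letter => List.replicate (tl - (xs.count letter : Int)).toNat letter)) := by
    apply List.perm_iff_count.2
    intro c
    rw [List.count_append, count_flatMap_replicate R hRnodup _ c, hLcount c]
    simp only [hSperm.mem_iff, hSperm.count_eq]
    by_cases hcx : c ∈ xs
    · have hcount : 1 ≤ xs.count c := List.count_pos_iff.2 hcx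
      by_cases hcR : c ∈ R
      · simp only [hcx, hcR, if_true]
        omega
      · simp only [hcx, hcR, if_true, if_false]
        omega
    · have hcR : c ∉ R := fun h => hcx (hRsub c h)
      simp [hcx, hcR, List.count_eq_zero.2 hcx]
  rw [PySem.List.sorted_id_eq_of_perm_of_pairwise _ _ hperm hLsort]
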